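-- pv_equiv track=rewrite | github.com/VAibhav1031/ALGO_CP | perfect_Sqaure.py | numSquare
-- ===== SOURCE A (Python) =====
-- def numSquare(n):
--     sqaures = []
--
--     i = 1
--     while i * i <= n:
--         sqaures.append(i * i)
--         i += 1
--
--     def dfs(target):
--         if target == 0:
--             return 0
--
--         if target < 0:
--             return float("inf")
--
--         minsquares = float("inf")
--
--         for sqaure in sqaures:
--             if sqaure > target:
--                 break
--
--             minsquares = min(minsquares, 1 + dfs(target - sqaure))
--
--         return minsquares
--
--     return dfs(n)
-- ===== SOURCE B (Python) =====
-- def numSquare(n):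
--     # Bottom-up DP: dp[t] = min number of perfect squares summing to t.
--     dp = [0]
--     for t in range(1, n + 1):
--         best = t  # t ones is always possible
--         s = 1
--         while s * s <= t:
--             c = dp[t - s * s] + 1
--             if c < best:
--                 best = c
--             s += 1
--         dp.append(best)
--     return dp[n]
-- ===== Notes on version B (the rewrite author's own statement) =====
-- stated objective: faster
-- what changed: replaced the exponential top-down recursion over the pre-built squares list with a bottom-up dynamic-programming table dp[0..n]
-- outside the precondition, e.g. on numSquare(-1): A returns inf, B returns 0; on numSquare(60000): A raises RecursionError, B returns 3
import Mathlib
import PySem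

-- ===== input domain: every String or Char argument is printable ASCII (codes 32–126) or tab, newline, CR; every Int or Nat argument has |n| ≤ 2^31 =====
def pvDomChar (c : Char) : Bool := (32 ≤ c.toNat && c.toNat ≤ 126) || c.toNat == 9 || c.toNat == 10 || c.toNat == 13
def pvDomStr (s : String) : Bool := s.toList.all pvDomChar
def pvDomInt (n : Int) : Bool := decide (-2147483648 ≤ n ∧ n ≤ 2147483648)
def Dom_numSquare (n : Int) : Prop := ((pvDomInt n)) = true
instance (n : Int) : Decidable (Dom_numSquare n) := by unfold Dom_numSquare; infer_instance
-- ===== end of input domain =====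

-- B replaces A's exponential top-down recursion with a bottom-up DP table (asymptotically faster).

-- ===== PORT A =====
-- `while i * i <= n: sqaures.append(i * i); i += 1`; fuel n.toNat+1 covers every i the loop visits.
def buildSq (n : Int) (i : Int) : Nat → List Int
  | 0 => []
  | fuel + 1 => if i * i ≤ n then i * i :: buildSq n (i + 1) fuel else []

-- float('inf') is modelled by `none`; `min` where `none` is +inf:
def optMin : Option Int → Option Int → Option Int
  | none, y => y
  | some a, none => some a
  | some a, some b => some (min a b)

mutual
-- `dfs(target)`; the fuel strictly exceeds target on every call made within Pre_.
def dfsA (squares : List Int) : Nat → Int → Option Int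
  | 0, _ => none -- fuel exhausted (unreachable within Pre_)
  | fuel + 1, target =>
    if target = 0 then some 0
    else if target < 0 then none
    else dfsGo squares squares target fuel none
  termination_by fuel _t => (fuel, 0)
-- the `for sqaure in sqaures` loop with its break, accumulating `minsquares`.
def dfsGo (squares : List Int) (sqs : List Int) (target : Int) (fuel : Nat)
    (best : Option Int) : Option Int :=
  match sqs with
  | [] => best
  | sq :: rest =>
    if sq > target then best
    else dfsGo squares rest target fuel
      (optMin best ((dfsA squares fuel (target - sq)).map (fun v => 1 + v)))
  termination_by (fuel, sqs.length)
end

-- `return dfs(n)`: within Pre_ the result is always `some` (getD 0 is never taken there).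
def numSquare (n : Int) : Int :=
  (dfsA (buildSq n 1 (n.toNat + 1)) (n.toNat + 1) n).getD 0

-- ===== PORT B =====
-- the inner `while s * s <= t` loop updating `best`
def sqLoop (dp : List Int) (t : Nat) (s : Nat) (best : Int) : Int :=
  if h : s * s ≤ t then
    sqLoop dp t (s + 1)
      (let c := dp.getD (t - s * s) 0 + 1; if c < best then c else best)
  else best
termination_by t + 1 - s
decreasing_by
  have hst : s ≤ t := by
    rcases Nat.eq_zero_or_pos s with hs | hs
    · omega
    · exact le_trans (Nat.le_mul_of_pos_left s hs) h
  omega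

-- `dp = [0]; for t in range(1, n+1): ... dp.append(best)`
def dpBuild : Nat → List Int
  | 0 => [0]
  | m + 1 => dpBuild m ++ [sqLoop (dpBuild m) (m + 1) 1 ((m : Int) + 1)]

def numSquare_alt (n : Int) : Int := (dpBuild n.toNat).getD n.toNat 0

-- ===== PRECONDITION & SPEC =====
-- Pre_ excludes n < 0, where A returns float('inf') (not an int), and n > 900, where A's
-- unmemoised depth-n recursion exceeds CPython's default recursion limit and raises RecursionError
-- (observed for n ≥ ~1000; 900 leaves a margin for the caller's own stack frames).
def Pre_numSquare (n : Int) : Prop := 0 ≤ n ∧ n ≤ 900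
instance (n : Int) : Decidable (Pre_numSquare n) := by unfold Pre_numSquare; infer_instance
def pvWitness_numSquare : Int := (12)

def Spec_numSquare (n : Int) (out : Int) : Prop := out = numSquare_alt n
instance (n : Int) (out : Int) : Decidable (Spec_numSquare n out) := by unfold Spec_numSquare; infer_instance

-- ===== CLAIM (what is proved, stated in full; the proofs are below) =====
def Claim_equal_numSquare : Prop := ∀ (n : Int), Dom_numSquare n → Pre_numSquare n → Spec_numSquare n (numSquare n)

-- ===== LEMMAS AND PROOFS =====

-- the squares list [s^2, (s+1)^2, ..., K^2]
def sqFrom (s K : Nat) : List Int :=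
  (List.range (K + 1 - s)).map (fun j => ((s + j : Nat) * (s + j : Nat) : Int))

def dpv (t : Nat) : Int := (dpBuild t).getD t 0

theorem sqFrom_nil {s K : Nat} (h : K < s) : sqFrom s K = [] := by
  unfold sqFrom
  rw [Nat.sub_eq_zero_of_le (by omega)]
  simp

theorem sqFrom_cons {s K : Nat} (h : s ≤ K) :
    sqFrom s K = ((s : Int) * s) :: sqFrom (s + 1) K := by
  unfold sqFrom
  have h1 : K + 1 - s = (K + 1 - (s + 1)) + 1 := by omega
  rw [h1, List.range_succ_eq_map, List.map_cons, List.map_map]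
  congr 1
  refine List.map_congr_left ?_
  intro j _
  have hj : s + Nat.succ j = s + 1 + j := by omega
  simp [Function.comp, hj]

theorem buildSq_eq (n : Int) (hn : 0 ≤ n) :
    ∀ fuel (s : Nat), 1 ≤ s → Nat.sqrt n.toNat + 2 - s ≤ fuel →
      buildSq n (s : Int) fuel = sqFrom s (Nat.sqrt n.toNat) := by
  intro fuel
  induction fuel with
  | zero =>
    intro s hs hf
    rw [buildSq, sqFrom_nil (by omega)]
  | succ fuel ih =>
    intro s hs hf
    rw [buildSq]
    by_cases hK : s ≤ Nat.sqrt n.toNat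
    · have h1 : s * s ≤ n.toNat := Nat.le_sqrt.mp hK
      have hcond : (s : Int) * s ≤ n := by
        calc ((s : Int) * s) = ((s * s : Nat) : Int) := by push_cast; ring
        _ ≤ (n.toNat : Int) := by exact_mod_cast h1
        _ = n := Int.toNat_of_nonneg hn
      rw [if_pos hcond, sqFrom_cons hK]
      have hc : (s : Int) + 1 = ((s + 1 : Nat) : Int) := by push_cast; ring
      rw [hc, ih (s + 1) (by omega) (by omega)]
    · have h2 : n.toNat < (Nat.sqrt n.toNat + 1) * (Nat.sqrt n.toNat + 1) :=
        Nat.lt_succ_sqrt n.toNat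
      have h3 : (Nat.sqrt n.toNat + 1) * (Nat.sqrt n.toNat + 1) ≤ s * s :=
        Nat.mul_le_mul (by omega) (by omega)
      have hcond : ¬ ((s : Int) * s ≤ n) := by
        rw [not_le]
        calc n = (n.toNat : Int) := (Int.toNat_of_nonneg hn).symm
        _ < ((s * s : Nat) : Int) := by exact_mod_cast (by omega : n.toNat < s * s)
        _ = (s : Int) * s := by push_cast; ring
      rw [if_neg hcond, sqFrom_nil (by omega)]

theorem dpBuild_length (m : Nat) : (dpBuild m).length = m + 1 := by
  induction m with
  | zero => rfl
  | succ m ih => simp [dpBuild, ih]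

theorem dpBuild_getD {m t : Nat} (h : t ≤ m) : (dpBuild m).getD t 0 = dpv t := by
  induction m with
  | zero => interval_cases t; rfl
  | succ m ih =>
    rcases Nat.lt_succ_iff_lt_or_eq.mp (Nat.lt_succ_of_le h) with h' | h'
    · rw [dpBuild, List.getD_append _ _ _ _ (by rw [dpBuild_length]; omega)]
      exact ih (by omega)
    · subst h'; rfl

theorem dpv_succ (m : Nat) : dpv (m + 1) = sqLoop (dpBuild m) (m + 1) 1 ((m : Int) + 1) := by
  unfold dpv
  rw [dpBuild, List.getD_append_right _ _ _ _ (by rw [dpBuild_length])]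
  simp [dpBuild_length]

theorem sqLoop_le (dp : List Int) (t s : Nat) (b : Int) : sqLoop dp t s b ≤ b := by
  induction s, b using sqLoop.induct dp t with
  | case1 s b h ih =>
    rw [sqLoop, dif_pos h]
    refine le_trans ih ?_
    dsimp only
    split <;> omega
  | case2 s b h => rw [sqLoop, dif_neg h]

theorem dpv_le (t : Nat) : dpv t ≤ (t : Int) := by
  cases t with
  | zero => simp [dpv, dpBuild]
  | succ m =>
    rw [dpv_succ]
    have := sqLoop_le (dpBuild m) (m + 1) 1 ((m : Int) + 1)
    push_cast
    omega

theorem go_eq (n : Int) (t fuel : Nat) (htn : t ≤ n.toNat) (sq0 : List Int)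
    (H : ∀ u, u < t → dfsA sq0 fuel (u : Int) = some (dpv u)) :
    ∀ d s b, Nat.sqrt n.toNat + 1 - s ≤ d → 1 ≤ s →
      dfsGo sq0 (sqFrom s (Nat.sqrt n.toNat)) (t : Int) fuel (some b)
        = some (sqLoop (dpBuild (t - 1)) t s b) := by
  intro d
  induction d with
  | zero =>
    intro s b hd hs
    have hKs : Nat.sqrt n.toNat < s := by omega
    have h2 : n.toNat < (Nat.sqrt n.toNat + 1) * (Nat.sqrt n.toNat + 1) :=
      Nat.lt_succ_sqrt n.toNat
    have h3 : ¬ (s * s ≤ t) := by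
      have := Nat.mul_le_mul (by omega : Nat.sqrt n.toNat + 1 ≤ s)
        (by omega : Nat.sqrt n.toNat + 1 ≤ s)
      omega
    rw [sqFrom_nil hKs, dfsGo.eq_def]
    dsimp only
    rw [sqLoop, dif_neg h3]
  | succ d ih =>
    intro s b hd hs
    by_cases hKs : s ≤ Nat.sqrt n.toNat
    · by_cases hst : s * s ≤ t
      · have hnotgt : ¬ ((s : Int) * s > (t : Int)) := by
          rw [not_lt]
          calc ((s : Int) * s) = ((s * s : Nat) : Int) := by push_cast; ring
          _ ≤ (t : Int) := by exact_mod_cast hst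
        have h11 : 1 * 1 ≤ s * s := Nat.mul_le_mul hs hs
        rw [sqFrom_cons hKs, dfsGo, if_neg hnotgt]
        have hcast : (t : Int) - (s : Int) * s = ((t - s * s : Nat) : Int) := by
          rw [Nat.cast_sub hst]; push_cast; ring
        rw [hcast, H (t - s * s) (by omega)]
        have hget : (dpBuild (t - 1)).getD (t - s * s) 0 = dpv (t - s * s) :=
          dpBuild_getD (by omega)
        have harg : (let c := (dpBuild (t - 1)).getD (t - s * s) 0 + 1;
            if c < b then c else b) = min b (1 + dpv (t - s * s)) := by
          dsimp only
          rw [hget, min_def]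
          split_ifs <;> omega
        conv_rhs => rw [sqLoop, dif_pos hst, harg]
        rw [← ih (s + 1) (min b (1 + dpv (t - s * s))) (by omega) (by omega)]
        simp [optMin]
      · have hgt : ((s : Int) * s > (t : Int)) := by
          calc (t : Int) < ((s * s : Nat) : Int) := by exact_mod_cast (by omega : t < s * s)
          _ = (s : Int) * s := by push_cast; ring
        rw [sqFrom_cons hKs, dfsGo, if_pos hgt, sqLoop, dif_neg hst]
    · have h2 : n.toNat < (Nat.sqrt n.toNat + 1) * (Nat.sqrt n.toNat + 1) :=
        Nat.lt_succ_sqrt n.toNat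
      have h3 : ¬ (s * s ≤ t) := by
        have := Nat.mul_le_mul (by omega : Nat.sqrt n.toNat + 1 ≤ s)
          (by omega : Nat.sqrt n.toNat + 1 ≤ s)
        omega
      rw [sqFrom_nil (show Nat.sqrt n.toNat < s by omega), dfsGo.eq_def]
      dsimp only
      rw [sqLoop, dif_neg h3]

theorem go_top (n : Int) (t fuel : Nat) (ht1 : 1 ≤ t) (htn : t ≤ n.toNat) (sq0 : List Int)
    (H : ∀ u, u < t → dfsA sq0 fuel (u : Int) = some (dpv u)) :
    dfsGo sq0 (sqFrom 1 (Nat.sqrt n.toNat)) (t : Int) fuel none = some (dpv t) := by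
  have hK1 : 1 ≤ Nat.sqrt n.toNat := by rw [Nat.le_sqrt]; omega
  rw [sqFrom_cons hK1, dfsGo, if_neg (by push_cast; omega)]
  have hu1 : (t : Int) - ((1 : Nat) : Int) * ((1 : Nat) : Int) = ((t - 1 : Nat) : Int) := by
    rw [Nat.cast_sub ht1]; push_cast; ring
  rw [hu1, H (t - 1) (by omega)]
  have hgo := go_eq n t fuel htn sq0 H (Nat.sqrt n.toNat) 2 (1 + dpv (t - 1))
    (by omega) (by omega)
  simp only [optMin, Option.map_some]
  rw [hgo]
  -- B side: unfold the first iteration of sqLoop at s = 1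
  obtain ⟨u, rfl⟩ : ∃ u, t = u + 1 := ⟨t - 1, by omega⟩
  rw [dpv_succ]
  have hget : (dpBuild u).getD (u + 1 - 1 * 1) 0 = dpv u := by
    rw [show u + 1 - 1 * 1 = u by omega]
    exact dpBuild_getD le_rfl
  have hle : dpv u ≤ (u : Int) := dpv_le u
  have harg : (let c := (dpBuild u).getD (u + 1 - 1 * 1) 0 + 1;
      if c < ((u : Int) + 1) then c else ((u : Int) + 1)) = 1 + dpv u := by
    dsimp only
    rw [hget]
    split_ifs <;> omega
  conv_rhs => rw [sqLoop, dif_pos (show 1 * 1 ≤ u + 1 by omega), harg]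
  rw [show u + 1 - 1 = u from rfl]

theorem dfsA_correct (n : Int) :
    ∀ fuel t, t ≤ n.toNat → t < fuel →
      dfsA (sqFrom 1 (Nat.sqrt n.toNat)) fuel (t : Int) = some (dpv t) := by
  intro fuel
  induction fuel with
  | zero => intro t _ h; omega
  | succ fuel ih =>
    intro t htn htf
    rcases Nat.eq_zero_or_pos t with ht0 | ht1
    · subst ht0
      rw [dfsA, if_pos (by norm_num)]
      simp [dpv, dpBuild]
    · have hne : ((t : Nat) : Int) ≠ 0 := by exact_mod_cast Nat.pos_iff_ne_zero.mp ht1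
      have hnneg : ¬ ((t : Int) < 0) := not_lt.mpr (Int.natCast_nonneg t)
      rw [dfsA, if_neg hne, if_neg hnneg]
      exact go_top n t fuel ht1 htn _ (fun u hu => ih u (by omega) (by omega))

theorem numSquare_key (n : Int) (hn : 0 ≤ n) : numSquare n = numSquare_alt n := by
  unfold numSquare numSquare_alt
  have hb : buildSq n 1 (n.toNat + 1) = sqFrom 1 (Nat.sqrt n.toNat) := by
    have hf : Nat.sqrt n.toNat + 2 - 1 ≤ n.toNat + 1 := by
      have := Nat.sqrt_le_self n.toNat; omega
    have h := buildSq_eq n hn (n.toNat + 1) 1 le_rfl hf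
    simpa using h
  have key : dfsA (sqFrom 1 (Nat.sqrt n.toNat)) (n.toNat + 1) n = some (dpv n.toNat) := by
    have h := dfsA_correct n (n.toNat + 1) n.toNat le_rfl (by omega)
    rwa [Int.toNat_of_nonneg hn] at h
  rw [hb, key]
  rfl

-- ===== VERDICT (by name: the statement is the Claim_ definition above) =====
theorem numSquare_spec : Claim_equal_numSquare := by
  intro n _ hpre
  unfold Spec_numSquare
  exact numSquare_key n hpre.1
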